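-- pv_equiv track=rewrite | github.com/antseer/antskill-creator | examples/S5/layers/L3-compute/volume.py | mark_in_drift
-- ===== SOURCE A (Python) =====
-- from typing import List, Dict, Any
--
-- def mark_in_drift(d81: List[Dict[str, Any]], d87: List[Dict[str, Any]]) -> List[bool]:
--     flags = [False] * len(d81)
--     for seg in d87:
--         start = seg.get("start", 0)
--         end = seg.get("end", -1)
--         for i in range(max(0, start), min(len(d81), end + 1)):
--             flags[i] = True
--     return flags
-- ===== SOURCE B (Python) =====
-- from typing import List, Dict, Any
--
-- def mark_in_drift(d81: List[Dict[str, Any]], d87: List[Dict[str, Any]]) -> List[bool]: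
--     # Difference array: +1 at each clamped start, -1 past each clamped end,
--     # then one prefix-sum pass; an index is flagged iff its running count is > 0.
--     n = len(d81)
--     diff = [0] * (n + 1)
--     for seg in d87:
--         lo = max(0, seg.get("start", 0))
--         hi = min(n, seg.get("end", -1) + 1)
--         if lo < hi:
--             diff[lo] += 1
--             diff[hi] -= 1
--     flags = []
--     c = 0
--     for i in range(n):
--         c += diff[i]
--         flags.append(c > 0)
--     return flags
-- ===== Notes on version B (the rewrite author's own statement) =====
-- stated objective: alternative
-- what changed: Replaces A's per-interval inner marking loop (touching every covered index of every segment) with a difference array: one +1/-1 boundary mark per segment and a single prefix-sum pass; work no longer depends on the summed interval lengths.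
import Mathlib
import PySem

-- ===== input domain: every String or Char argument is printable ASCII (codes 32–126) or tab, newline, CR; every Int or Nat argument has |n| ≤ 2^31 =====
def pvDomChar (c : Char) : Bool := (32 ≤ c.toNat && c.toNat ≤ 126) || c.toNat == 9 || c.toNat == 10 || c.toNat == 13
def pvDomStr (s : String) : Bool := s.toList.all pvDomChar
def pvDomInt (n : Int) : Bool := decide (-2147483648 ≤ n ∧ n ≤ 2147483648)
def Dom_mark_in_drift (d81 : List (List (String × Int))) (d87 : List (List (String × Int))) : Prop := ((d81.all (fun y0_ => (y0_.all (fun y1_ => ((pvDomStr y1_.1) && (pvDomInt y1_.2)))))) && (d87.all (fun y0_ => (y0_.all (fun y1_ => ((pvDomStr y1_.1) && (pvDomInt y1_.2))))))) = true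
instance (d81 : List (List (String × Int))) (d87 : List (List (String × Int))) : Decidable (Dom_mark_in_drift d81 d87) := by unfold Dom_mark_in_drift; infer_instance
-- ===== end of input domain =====

-- B replaces A's per-interval inner marking loop with a difference array (+1/-1 at the
-- clamped boundaries of each segment) followed by one prefix-sum pass, so its work does not
-- depend on the summed interval lengths. Return values agree on all inputs; no mutation.

-- ===== PORT A =====
-- seg.get("start", 0) / seg.get("end", -1): first-match lookup in the association list.
def segStart (seg : List (String × Int)) : Int := (PySem.Dict.mk seg).getD "start" 0
def segEnd (seg : List (String × Int)) : Int := (PySem.Dict.mk seg).getD "end" (-1)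

def mark_in_drift (d81 : List (List (String × Int))) (d87 : List (List (String × Int))) : List Bool :=
  -- flags = [False] * len(d81); for seg in d87: for i in range(max(0,start), min(len(d81),end+1)): flags[i] = True
  d87.foldl
    (fun flags seg =>
      (PySem.List.pyRange (max 0 (segStart seg)) (min ((d81.length : Int)) (segEnd seg + 1)) 1).foldl
        (fun f i => PySem.List.pySetD f i true) flags)
    (List.replicate d81.length false)

-- ===== PORT B =====
-- the prefix-sum pass of Source B: for d in diff[:n]: c += d; flags.append(c > 0)
def scanFlags : List Int → Int → List Bool
  | [], _ => []
  | d :: ds, c => (decide (c + d > 0)) :: scanFlags ds (c + d)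

def mark_in_drift_alt (d81 : List (List (String × Int))) (d87 : List (List (String × Int))) : List Bool :=
  let n := d81.length
  let diff : List Int := d87.foldl
    (fun d seg =>
      -- lo = max(0, seg.get("start", 0)); hi = min(n, seg.get("end", -1) + 1)
      if max 0 (segStart seg) < min ((n : Int)) (segEnd seg + 1) then
        -- diff[lo] += 1; diff[hi] -= 1  (lo, hi ≥ 0 here, so .toNat is exact)
        ((d.modify (max 0 (segStart seg)).toNat (· + 1)).modify
          (min ((n : Int)) (segEnd seg + 1)).toNat (· - 1))
      else d)
    (List.replicate (n + 1) 0)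
  scanFlags (PySem.List.slice diff none (some ((n : Int)))) 0

-- ===== PRECONDITION & SPEC =====
def Spec_mark_in_drift (d81 : List (List (String × Int))) (d87 : List (List (String × Int))) (out : List Bool) : Prop := out = mark_in_drift_alt d81 d87
instance (d81 : List (List (String × Int))) (d87 : List (List (String × Int))) (out : List Bool) : Decidable (Spec_mark_in_drift d81 d87 out) := by unfold Spec_mark_in_drift; infer_instance

-- ===== CLAIM (what is proved, stated in full; the proofs are below) =====
def Claim_equal_mark_in_drift : Prop := ∀ (d81 : List (List (String × Int))) (d87 : List (List (String × Int))), Dom_mark_in_drift d81 d87 → Spec_mark_in_drift d81 d87 (mark_in_drift d81 d87)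

-- ===== LEMMAS AND PROOFS =====

-- the Boolean "segment seg covers index i" predicate both sides reduce to
def covers (n : Nat) (seg : List (String × Int)) (i : Nat) : Bool :=
  decide (max 0 (segStart seg) ≤ (i : Int) ∧ (i : Int) < min ((n : Int)) (segEnd seg + 1))

-- ---- A side ----
theorem length_markA (lo hi : Int) (f : List Bool) :
    ((PySem.List.pyRange lo hi 1).foldl (fun f i => PySem.List.pySetD f i true) f).length = f.length := by
  generalize hN : (hi - lo).toNat = N
  induction N generalizing lo f with
  | zero =>
    have h : hi ≤ lo := by omega
    simp [PySem.List.pyRange_one_eq_nil h]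
  | succ N ih =>
    have hlt : lo < hi := by omega
    rw [PySem.List.pyRange_one_cons hlt]
    simp only [List.foldl_cons]
    rw [ih (lo + 1) _ (by omega)]
    simp [PySem.List.length_pySetD]

theorem markA_getD (lo hi : Int) (hlo : 0 ≤ lo) (f : List Bool) (k : Nat) (hk : k < f.length) :
    ((PySem.List.pyRange lo hi 1).foldl (fun f i => PySem.List.pySetD f i true) f).getD k false
      = (f.getD k false || decide (lo ≤ (k : Int) ∧ (k : Int) < hi)) := by
  generalize hN : (hi - lo).toNat = N
  induction N generalizing lo f with
  | zero =>
    have h : hi ≤ lo := by omega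
    have h2 : ¬ (lo ≤ (k : Int) ∧ (k : Int) < hi) := by omega
    simp [PySem.List.pyRange_one_eq_nil h, h2]
  | succ N ih =>
    have hlt : lo < hi := by omega
    rw [PySem.List.pyRange_one_cons hlt]
    simp only [List.foldl_cons]
    rw [PySem.List.pySetD_of_nonneg f true hlo]
    rw [ih (lo + 1) (by omega) (f.set lo.toNat true) (by simpa using hk) (by omega)]
    by_cases hkl : k = lo.toNat
    · subst hkl
      simp only [List.getD_eq_getElem?_getD, List.getElem?_set, hk, if_true]
      simp [hk]
      exact Or.inr ⟨hlt, by omega⟩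
    · have hne : (k : Int) ≠ lo := by omega
      have h2 : (lo + 1 ≤ (k : Int) ∧ (k : Int) < hi) ↔ (lo ≤ (k : Int) ∧ (k : Int) < hi) := by omega
      have h3 : lo.toNat ≠ k := fun h => hkl h.symm
      simp [List.getD_eq_getElem?_getD, h3]
      rw [decide_eq_decide.mpr (show lo < (k : Int) ↔ lo ≤ (k : Int) by omega)]

theorem foldA_length (d81 : List (List (String × Int))) (segs : List (List (String × Int))) (f : List Bool) :
    (segs.foldl
      (fun flags seg =>
        (PySem.List.pyRange (max 0 (segStart seg)) (min ((d81.length : Int)) (segEnd seg + 1)) 1).foldl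
          (fun f i => PySem.List.pySetD f i true) flags) f).length = f.length := by
  induction segs generalizing f with
  | nil => rfl
  | cons s segs ih => simp only [List.foldl_cons]; rw [ih, length_markA]

theorem length_A (d81 d87 : List (List (String × Int))) :
    (mark_in_drift d81 d87).length = d81.length := by
  unfold mark_in_drift
  rw [foldA_length]
  exact List.length_replicate

theorem foldA_getD (d81 : List (List (String × Int))) (segs : List (List (String × Int))) (f : List Bool) (k : Nat) (hk : k < f.length) :
    (segs.foldl
      (fun flags seg =>
        (PySem.List.pyRange (max 0 (segStart seg)) (min ((d81.length : Int)) (segEnd seg + 1)) 1).foldl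
          (fun f i => PySem.List.pySetD f i true) flags) f).getD k false
      = (f.getD k false || segs.any (fun seg => covers d81.length seg k)) := by
  induction segs generalizing f with
  | nil => simp
  | cons s segs ih =>
    simp only [List.foldl_cons]
    rw [ih _ (by rw [length_markA]; exact hk)]
    rw [markA_getD _ _ (le_max_left 0 _) f k hk]
    simp [covers, Bool.or_assoc]

theorem A_getD (d81 d87 : List (List (String × Int))) (k : Nat) (hk : k < d81.length) :
    (mark_in_drift d81 d87).getD k false = d87.any (fun seg => covers d81.length seg k) := by
  unfold mark_in_drift
  rw [foldA_getD _ _ _ k (by simpa using hk)]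
  simp

-- ---- B side ----
theorem length_scanFlags (ds : List Int) (c : Int) : (scanFlags ds c).length = ds.length := by
  induction ds generalizing c with
  | nil => rfl
  | cons d ds ih => simp [scanFlags, ih]

theorem scanFlags_getD (ds : List Int) (c : Int) (k : Nat) (hk : k < ds.length) :
    (scanFlags ds c).getD k false = decide (c + ((ds.take (k + 1)).sum) > 0) := by
  induction ds generalizing c k with
  | nil => simp at hk
  | cons d ds ih =>
    cases k with
    | zero => simp [scanFlags]
    | succ k =>
      simp only [scanFlags, List.getD_cons_succ, List.take_succ_cons, List.sum_cons]
      rw [ih (c + d) k (by simpa using hk)]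
      congr 1
      ring_nf

theorem sum_take_modify (l : List Int) (j k : Nat) (v : Int) (hj : j < l.length) :
    ((l.modify j (· + v)).take k).sum = (l.take k).sum + (if j < k then v else 0) := by
  induction l generalizing j k with
  | nil => simp at hj
  | cons x xs ih =>
    cases j with
    | zero =>
      cases k with
      | zero => simp
      | succ k => simp [List.modify_cons]; ring
    | succ j =>
      cases k with
      | zero => simp
      | succ k =>
        rw [show ((x :: xs).modify (j + 1) fun y => y + v) = x :: (xs.modify j fun y => y + v) from by
          simp]
        simp only [List.take_succ_cons, List.sum_cons]
        rw [ih j k (by simpa using hj)]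
        have : j + 1 < k + 1 ↔ j < k := by omega
        simp [this]
        ring

theorem foldB_length (n : Nat) (segs : List (List (String × Int))) (d : List Int) :
    (segs.foldl
      (fun d seg =>
        if max 0 (segStart seg) < min ((n : Int)) (segEnd seg + 1) then
          ((d.modify (max 0 (segStart seg)).toNat (· + 1)).modify
            (min ((n : Int)) (segEnd seg + 1)).toNat (· - 1))
        else d) d).length = d.length := by
  induction segs generalizing d with
  | nil => rfl
  | cons s segs ih =>
    simp only [List.foldl_cons]
    rw [ih]
    split <;> simp

theorem foldB_take_sum (n : Nat) (segs : List (List (String × Int))) (d : List Int) (i : Nat)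
    (hd : d.length = n + 1) (_hin : i < n) :
    ((segs.foldl
      (fun d seg =>
        if max 0 (segStart seg) < min ((n : Int)) (segEnd seg + 1) then
          ((d.modify (max 0 (segStart seg)).toNat (· + 1)).modify
            (min ((n : Int)) (segEnd seg + 1)).toNat (· - 1))
        else d) d).take (i + 1)).sum
      = (d.take (i + 1)).sum + ((segs.countP (fun s => covers n s i) : Nat) : Int) := by
  induction segs generalizing d with
  | nil => simp
  | cons s segs ih =>
    simp only [List.foldl_cons, List.countP_cons]
    have h0 : 0 ≤ max 0 (segStart s) := le_max_left 0 _
    have hnle : min ((n : Int)) (segEnd s + 1) ≤ (n : Int) := min_le_left _ _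
    by_cases hc : max 0 (segStart s) < min ((n : Int)) (segEnd s + 1)
    · rw [if_pos hc]
      rw [ih _ (by simp [hd])]
      rw [show (fun x : Int => x - 1) = (fun x => x + (-1)) from by funext x; ring]
      rw [sum_take_modify _ _ _ _ (by simp only [List.length_modify, hd]; omega)]
      rw [sum_take_modify _ _ _ _ (by simp only [hd]; omega)]
      have hcov : (covers n s i = true) ↔
          (max 0 (segStart s) ≤ (i : Int) ∧ (i : Int) < min ((n : Int)) (segEnd s + 1)) := by
        simp [covers]
      split_ifs with h1 h2 h3 h4 h5 <;> rw [hcov] at * <;> push_cast <;> omega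
    · rw [if_neg hc]
      rw [ih _ hd]
      have hcov : covers n s i = false := by
        simp only [covers, decide_eq_false_iff_not]
        omega
      simp [hcov]

theorem length_B (d81 d87 : List (List (String × Int))) :
    (mark_in_drift_alt d81 d87).length = d81.length := by
  simp only [mark_in_drift_alt]
  rw [length_scanFlags, PySem.List.slice_to _ (by omega)]
  simp only [Int.toNat_natCast, List.length_take, foldB_length, List.length_replicate]
  omega

theorem B_getD (d81 d87 : List (List (String × Int))) (i : Nat) (hi : i < d81.length) :
    (mark_in_drift_alt d81 d87).getD i false = d87.any (fun seg => covers d81.length seg i) := by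
  simp only [mark_in_drift_alt]
  rw [PySem.List.slice_to _ (by omega)]
  simp only [Int.toNat_natCast]
  rw [scanFlags_getD _ _ i (by simp only [List.length_take, foldB_length, List.length_replicate]; omega)]
  rw [List.take_take]
  rw [show min (i + 1) d81.length = i + 1 by omega]
  rw [foldB_take_sum _ _ _ i (by simp) hi]
  rw [show (List.take (i + 1) (List.replicate (d81.length + 1) (0 : Int))).sum = 0 by
    simp [List.take_replicate]]
  simp only [zero_add, gt_iff_lt]
  cases hA : d87.any (fun seg => covers d81.length seg i) with
  | true =>
    obtain ⟨a, ha, hpa⟩ := List.any_eq_true.mp hA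
    have hpos : 0 < d87.countP (fun s => covers d81.length s i) :=
      List.countP_pos_iff.mpr ⟨a, ha, hpa⟩
    simp only [decide_eq_true_eq]
    exact_mod_cast hpos
  | false =>
    have : d87.countP (fun s => covers d81.length s i) = 0 := by
      rw [List.countP_eq_zero]
      intro a ha
      have := List.any_eq_false.mp hA a ha
      simpa using this
    rw [this]
    simp

-- ===== VERDICT (by name: the statement is the Claim_ definition above) =====
theorem mark_in_drift_spec : Claim_equal_mark_in_drift := by
  intro d81 d87 _
  unfold Spec_mark_in_drift
  apply List.ext_getElem (by rw [length_A, length_B])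
  intro i h1 h2
  rw [← List.getD_eq_getElem (mark_in_drift d81 d87) false h1,
      ← List.getD_eq_getElem (mark_in_drift_alt d81 d87) false h2,
      A_getD _ _ i (by rw [← length_A d81 d87]; exact h1),
      B_getD _ _ i (by rw [← length_B d81 d87]; exact h2)]
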